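-- pv_equiv track=rewrite | github.com/jangwoopark/exercises-python | salary-blues/salary-blues.py | solve
-- ===== SOURCE A (Python) =====
-- def find_gcd(x, y):
--     while(y):
--         x, y = y, x % y
--
--     return x
--
-- def solve(a, queries):
--     l=[]
--     num1=a[0]
--     num2=a[1]
--     f=0
--     if(len(list(set(a)))==1):
--         f=1
--     gcd=find_gcd(num1,num2)
--     for i in range(2,len(a)):
--         gcd=find_gcd(gcd,a[i])
--     for j in range(len(queries)):
--         if(f==1):
--             l.append(gcd+queries[j])
--         else:
--             l.append(find_gcd(gcd,queries[j]))
--     return l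
-- ===== SOURCE B (Python) =====
-- # B: single pass accumulating the running GCD and an all-equal flag, instead of
-- # A's separate set() distinctness check plus an index-based GCD loop; per-query
-- # logic becomes two list comprehensions. Objective: simpler, same cost.
-- def _gcd(x, y):
--     return x if y == 0 else _gcd(y, x % y)
--
-- def solve(a, queries):
--     g = a[0]
--     all_equal = True
--     for x in a[1:]:
--         all_equal = all_equal and x == a[0]
--         g = _gcd(g, x)
--     if all_equal:
--         return [g + q for q in queries]
--     return [_gcd(g, q) for q in queries]
-- ===== Notes on version B (the rewrite author's own statement) =====
-- stated objective: simpler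
-- what changed: One pass over the list accumulates the running GCD and an all-equal flag together, replacing A's separate set(a) distinctness check and index-2..n GCD loop; the query loop becomes two comprehensions.
import Mathlib
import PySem

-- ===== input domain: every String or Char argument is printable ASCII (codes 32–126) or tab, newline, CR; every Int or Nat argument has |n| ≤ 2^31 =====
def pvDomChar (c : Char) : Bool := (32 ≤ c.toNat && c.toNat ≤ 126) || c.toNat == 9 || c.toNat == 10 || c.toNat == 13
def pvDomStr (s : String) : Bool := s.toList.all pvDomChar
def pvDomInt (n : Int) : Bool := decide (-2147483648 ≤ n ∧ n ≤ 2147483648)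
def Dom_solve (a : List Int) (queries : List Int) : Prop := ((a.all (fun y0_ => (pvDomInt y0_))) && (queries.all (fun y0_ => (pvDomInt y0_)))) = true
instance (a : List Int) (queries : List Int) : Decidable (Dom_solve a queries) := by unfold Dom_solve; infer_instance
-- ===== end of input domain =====

-- B does one pass accumulating the running GCD and an all-equal flag, instead of A's
-- set() distinctness check plus an index-2..n GCD loop (objective: simpler).

-- ===== PORT A =====
-- while(y): x, y = y, x % y; return x   (Python % — PySem.Int.mod)
def findGcd (x y : Int) : Int :=
  if h : y = 0 then x else findGcd y (PySem.Int.mod x y)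
termination_by y.natAbs
decreasing_by
  rcases lt_or_gt_of_ne h with hy | hy
  · have := PySem.Int.mod_neg_bounds x hy; omega
  · have h1 := PySem.Int.mod_nonneg x hy
    have h2 := PySem.Int.mod_lt x hy; omega

def solve (a : List Int) (queries : List Int) : List Int :=
  match PySem.List.pyGet? a 0, PySem.List.pyGet? a 1 with
  | some num1, some num2 =>
    let f : Int := if (PySem.Set.ofList a).length = 1 then 1 else 0
    let gcd :=
      (PySem.List.pyRange 2 (a.length : Int) 1).foldl
        (fun g i => findGcd g (PySem.List.pyGetD a i 0)) (findGcd num1 num2)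
    (PySem.List.pyRange 0 (queries.length : Int) 1).foldl
      (fun l j =>
        l ++ [if f = 1 then gcd + PySem.List.pyGetD queries j 0
              else findGcd gcd (PySem.List.pyGetD queries j 0)]) []
  | _, _ => []  -- a[0] / a[1] raise IndexError: excluded by Pre_solve

-- ===== PORT B =====
-- return x if y == 0 else _gcd(y, x % y)
def gcdB (x y : Int) : Int :=
  if h : y = 0 then x else gcdB y (PySem.Int.mod x y)
termination_by y.natAbs
decreasing_by
  rcases lt_or_gt_of_ne h with hy | hy
  · have := PySem.Int.mod_neg_bounds x hy; omega
  · have h1 := PySem.Int.mod_nonneg x hy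
    have h2 := PySem.Int.mod_lt x hy; omega

def solve_alt (a : List Int) (queries : List Int) : List Int :=
  match PySem.List.pyGet? a 0 with
  | some a0 =>
    let st := (PySem.List.slice a (some 1) none).foldl
      (fun (s : Int × Bool) x => (gcdB s.1 x, s.2 && (x == a0))) (a0, true)
    if st.2 then queries.map (fun q => st.1 + q)
    else queries.map (fun q => gcdB st.1 q)
  | none => []  -- a[0] raises IndexError

-- ===== PRECONDITION & SPEC =====
-- A reads a[0] and a[1] unconditionally: it raises IndexError iff a has fewer than 2 elements.
def Pre_solve (a : List Int) (queries : List Int) : Prop := 2 ≤ a.length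
instance (a : List Int) (queries : List Int) : Decidable (Pre_solve a queries) := by unfold Pre_solve; infer_instance
def pvWitness_solve : List Int × List Int := ([4, 6, 8], [10, 3])

def Spec_solve (a : List Int) (queries : List Int) (out : List Int) : Prop := out = solve_alt a queries
instance (a : List Int) (queries : List Int) (out : List Int) : Decidable (Spec_solve a queries out) := by unfold Spec_solve; infer_instance

-- ===== CLAIM (what is proved, stated in full; the proofs are below) =====
def Claim_equal_solve : Prop := ∀ (a : List Int) (queries : List Int), Dom_solve a queries → Pre_solve a queries → Spec_solve a queries (solve a queries)

-- ===== LEMMAS AND PROOFS =====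

-- the two Euclid helpers (A's while loop, B's recursion) compute the same function
theorem gcdB_eq_findGcd (x y : Int) : gcdB x y = findGcd x y := by
  fun_induction gcdB x y <;> · rw [findGcd]; simp_all

theorem foldl_findGcd_eq (m : List Int) (g : Int) :
    m.foldl findGcd g = m.foldl gcdB g := by
  induction m generalizing g with
  | nil => rfl
  | cons y ys ih => simp [List.foldl_cons, ih, gcdB_eq_findGcd]

-- B's pair fold splits into the plain gcd fold and an all-equal check
theorem pair_fold_eq (l : List Int) (a0 g : Int) (b : Bool) :
    l.foldl (fun (s : Int × Bool) x => (gcdB s.1 x, s.2 && (x == a0))) (g, b)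
      = (l.foldl gcdB g, b && l.all (· == a0)) := by
  induction l generalizing g b with
  | nil => simp
  | cons x xs ih => simp [List.foldl_cons, ih, Bool.and_assoc]

-- A's query loop builds the list by repeated append: it is a map
theorem query_loop_eq_map (qs : List Int) (F : Int → Int) :
    List.foldl (fun l j => l ++ [F (PySem.List.pyGetD qs j 0)]) []
      (PySem.List.pyRange 0 (qs.length : Int) 1) = qs.map F := by
  refine (PySem.List.foldl_pyRange_zero_pyGetD' qs 0 (fun l v => l ++ [F v]) []).trans ?_
  simpa using PySem.List.foldl_append_singleton_eq_map F qs []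

-- set(x0::l) is a singleton iff every element of l equals x0
theorem ofList_len_one_iff (x0 : Int) (l : List Int) :
    (PySem.Set.ofList (x0 :: l)).length = 1 ↔ l.all (· == x0) = true := by
  constructor
  · intro h
    rcases hs : PySem.Set.ofList (x0 :: l) with _ | ⟨z, zs⟩
    · rw [hs] at h; simp at h
    · rw [hs] at h
      have hz : zs = [] := by simpa using h
      subst hz
      have hx0 : x0 ∈ PySem.Set.ofList (x0 :: l) := by
        rw [PySem.Set.mem_ofList]; simp
      rw [hs] at hx0; simp at hx0
      subst hx0
      simp only [List.all_eq_true]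
      intro y hy
      have hym : y ∈ PySem.Set.ofList (x0 :: l) := by
        rw [PySem.Set.mem_ofList]; simp [hy]
      rw [hs] at hym; simpa using hym
  · intro h
    have haux : ∀ m : List Int, m.all (· == x0) = true →
        m.foldl PySem.Set.add [x0] = [x0] := by
      intro m
      induction m with
      | nil => simp
      | cons y ys ih =>
        intro hm
        simp only [List.all_cons, Bool.and_eq_true, beq_iff_eq] at hm
        obtain ⟨hy, hys⟩ := hm
        subst hy
        rw [List.foldl_cons]
        have hadd : PySem.Set.add [y] y = [y] := by
          simp [PySem.Set.add, PySem.Set.contains]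
        rw [hadd]
        exact ih (by simpa using hys)
    have hone : PySem.Set.ofList (x0 :: l) = [x0] := by
      rw [PySem.Set.ofList_eq_foldl, List.foldl_cons]
      have hadd0 : PySem.Set.add ([] : List Int) x0 = [x0] := by
        simp [PySem.Set.add, PySem.Set.contains]
      rw [hadd0]
      exact haux l h
    simp [hone]

theorem solve_eq (a queries : List Int) (hpre : 2 ≤ a.length) :
    solve a queries = solve_alt a queries := by
  match a with
  | [] => simp at hpre
  | [_] => simp at hpre
  | x0 :: x1 :: rest =>
    have h0 : PySem.List.pyGet? (x0 :: x1 :: rest) (0 : Int) = some x0 := by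
      simpa using PySem.List.pyGet?_natCast (x0 :: x1 :: rest) 0
    have h1 : PySem.List.pyGet? (x0 :: x1 :: rest) (1 : Int) = some x1 := by
      simpa using PySem.List.pyGet?_natCast (x0 :: x1 :: rest) 1
    have hslice : PySem.List.slice (x0 :: x1 :: rest) (some (1 : Int)) none
        = x1 :: rest := by
      have := PySem.List.slice_from_natCast (x0 :: x1 :: rest) 1
      simpa using this
    have hG : List.foldl (fun g i => findGcd g (PySem.List.pyGetD (x0 :: x1 :: rest) i 0))
        (findGcd x0 x1) (PySem.List.pyRange 2 (((x0 :: x1 :: rest).length : Int)) 1)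
        = (x1 :: rest).foldl gcdB x0 := by
      rw [PySem.List.foldl_pyRange_pyGetD' (x0 :: x1 :: rest) 0 findGcd (findGcd x0 x1)
        (by norm_num : (0:Int) ≤ 2)]
      rw [show List.drop ((2:Int)).toNat (x0 :: x1 :: rest) = rest from rfl, List.foldl_cons, foldl_findGcd_eq, gcdB_eq_findGcd]
    unfold solve solve_alt
    rw [h0, h1]
    simp only [hslice, pair_fold_eq, Bool.true_and, hG]
    by_cases hall : ((x1 :: rest).all (· == x0)) = true
    · have hP : (PySem.Set.ofList (x0 :: x1 :: rest)).length = 1 :=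
        (ofList_len_one_iff x0 (x1 :: rest)).mpr hall
      simp only [hP, if_pos, hall]
      exact query_loop_eq_map queries (fun v => (x1 :: rest).foldl gcdB x0 + v)
    · have hP : ¬ (PySem.Set.ofList (x0 :: x1 :: rest)).length = 1 := by
        rw [ofList_len_one_iff x0 (x1 :: rest)]; exact hall
      simp only [hP, if_false, hall, gcdB_eq_findGcd]
      have := query_loop_eq_map queries
        (fun v => findGcd ((x1 :: rest).foldl gcdB x0) v)
      simpa [gcdB_eq_findGcd] using this

-- ===== VERDICT (by name: the statement is the Claim_ definition above) =====
theorem solve_spec : Claim_equal_solve := by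
  intro a queries _ hpre
  exact solve_eq a queries hpre
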